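-- pv_equiv track=rewrite | github.com/serolugo/semicolab-ip-tile-wizard | tilewizard/tilewizard/core/validator.py | _bits_to_ranges
-- ===== SOURCE A (Python) =====
-- from typing import Any, Dict, List, Tuple
--
-- def _bits_to_ranges(bits: List[int]) -> List[Tuple[int, int]]:
--     """Convert a sorted list of bit indices to (hi, lo) contiguous ranges."""
--     if not bits:
--         return []
--     ranges = []
--     lo = hi = bits[0]
--     for b in bits[1:]:
--         if b == hi + 1:
--             hi = b
--         else:
--             ranges.append((hi, lo))
--             lo = hi = b
--     ranges.append((hi, lo))
--     return ranges
-- ===== SOURCE B (Python) =====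
-- from itertools import groupby
-- from typing import List, Tuple
--
--
-- def _bits_to_ranges(bits: List[int]) -> List[Tuple[int, int]]:
--     """Convert a sorted list of bit indices to (hi, lo) contiguous ranges."""
--     ranges = []
--     for _, grp in groupby(enumerate(bits), key=lambda p: p[1] - p[0]):
--         items = list(grp)
--         ranges.append((items[-1][1], items[0][1]))
--     return ranges
-- ===== Notes on version B (the rewrite author's own statement) =====
-- stated objective: idiomatic
-- what changed: Replaces the explicit boundary-detecting loop threading lo/hi state with itertools.groupby over enumerate(bits) keyed by value-minus-index, so each contiguous run is one group whose first/last items give (hi, lo).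
import Mathlib
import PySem

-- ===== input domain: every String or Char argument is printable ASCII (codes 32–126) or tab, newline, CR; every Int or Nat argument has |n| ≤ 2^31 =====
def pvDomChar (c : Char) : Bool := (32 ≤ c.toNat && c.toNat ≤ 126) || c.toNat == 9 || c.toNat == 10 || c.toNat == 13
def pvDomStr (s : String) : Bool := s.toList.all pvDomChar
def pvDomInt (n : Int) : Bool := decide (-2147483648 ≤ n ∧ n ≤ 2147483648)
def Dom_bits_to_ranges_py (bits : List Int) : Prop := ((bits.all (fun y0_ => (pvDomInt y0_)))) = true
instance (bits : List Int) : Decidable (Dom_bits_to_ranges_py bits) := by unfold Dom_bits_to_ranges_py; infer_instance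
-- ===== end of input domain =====

-- B replaces A's stateful boundary-detecting loop by grouping enumerate(bits) on the key
-- value-minus-index (itertools.groupby); objective: idiomatic. Same return value on all inputs.

-- ===== PORT A =====
def bits_to_ranges_py (bits : List Int) : List (Int × Int) :=
  match bits with
  | [] => []
  | b0 :: rest =>
    -- state: (ranges, lo, hi)
    let st := rest.foldl
      (fun (st : List (Int × Int) × Int × Int) b =>
        if b = st.2.2 + 1 then (st.1, st.2.1, b)
        else (st.1 ++ [(st.2.2, st.2.1)], b, b))
      ([], b0, b0)
    st.1 ++ [(st.2.2, st.2.1)]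

-- ===== PORT B =====
-- itertools.groupby on an already-keyed list: maximal runs of equal keys, in order
def pvGroupRuns : List (Int × Int) → List (List (Int × Int))
  | [] => []
  | p :: ps =>
    match pvGroupRuns ps with
    | (q :: g) :: gs => if p.1 = q.1 then (p :: q :: g) :: gs else [p] :: (q :: g) :: gs
    | gs => [p] :: gs

def bits_to_ranges_py_alt (bits : List Int) : List (Int × Int) :=
  (pvGroupRuns ((PySem.List.enumerate bits).map (fun p => (p.2 - p.1, p.2)))).map
    (fun g => ((g.getLastD (0, 0)).2, (g.headD (0, 0)).2))

-- ===== PRECONDITION & SPEC =====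
def Spec_bits_to_ranges_py (bits : List Int) (out : List (Int × Int)) : Prop := out = bits_to_ranges_py_alt bits
instance (bits : List Int) (out : List (Int × Int)) : Decidable (Spec_bits_to_ranges_py bits out) := by unfold Spec_bits_to_ranges_py; infer_instance

-- ===== CLAIM (what is proved, stated in full; the proofs are below) =====
def Claim_equal_bits_to_ranges_py : Prop := ∀ (bits : List Int), Dom_bits_to_ranges_py bits → Spec_bits_to_ranges_py bits (bits_to_ranges_py bits)

-- ===== LEMMAS AND PROOFS =====

-- reference recursion both ports are reduced to: runs with first run's lo pinned
def pvRuns (lo prev : Int) : List Int → List (Int × Int)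
  | [] => [(prev, lo)]
  | b :: bs => if b = prev + 1 then pvRuns lo b bs else (prev, lo) :: pvRuns b b bs

def pvSetLo (lo : Int) : List (Int × Int) → List (Int × Int)
  | [] => []
  | (h, _) :: t => (h, lo) :: t

theorem pvRuns_ne_nil (lo prev : Int) (bs : List Int) : pvRuns lo prev bs ≠ [] := by
  induction bs generalizing lo prev with
  | nil => simp [pvRuns]
  | cons b bs ih =>
    simp only [pvRuns]
    split
    · exact ih lo b
    · simp

theorem pvRuns_setLo (lo prev : Int) (bs : List Int) :
    pvRuns lo prev bs = pvSetLo lo (pvRuns prev prev bs) := by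
  induction bs generalizing lo prev with
  | nil => simp [pvRuns, pvSetLo]
  | cons b bs ih =>
    simp only [pvRuns]
    split
    · rw [ih lo b, ih prev b]
      cases h : pvRuns b b bs with
      | nil => exact absurd h (pvRuns_ne_nil b b bs)
      | cons p t => cases p; simp [pvSetLo]
    · simp [pvSetLo]

-- A's fold equals pvRuns
theorem pvFoldA (bs : List Int) (ranges : List (Int × Int)) (lo prev : Int) :
    (let st := bs.foldl
          (fun (st : List (Int × Int) × Int × Int) b =>
            if b = st.2.2 + 1 then (st.1, st.2.1, b)
            else (st.1 ++ [(st.2.2, st.2.1)], b, b))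
          (ranges, lo, prev);
      st.1 ++ [(st.2.2, st.2.1)]) = ranges ++ pvRuns lo prev bs := by
  induction bs generalizing ranges lo prev with
  | nil => simp [pvRuns]
  | cons b bs ih =>
    simp only [List.foldl_cons, pvRuns]
    split
    · exact ih ranges lo b
    · rw [ih (ranges ++ [(prev, lo)]) b b]
      simp

-- unfold pvGroupRuns one constructor at a time
theorem pvGroupRuns_cons (p : Int × Int) (ps : List (Int × Int)) :
    pvGroupRuns (p :: ps) =
      match pvGroupRuns ps with
      | (q :: g) :: gs => if p.1 = q.1 then (p :: q :: g) :: gs else [p] :: (q :: g) :: gs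
      | gs => [p] :: gs := rfl

-- the keyed list B groups: (b - i, b) for successive indices
theorem pvKeyed_cons (b : Int) (bs : List Int) (i : Int) :
    (PySem.List.enumerate (b :: bs) i).map (fun p => (p.2 - p.1, p.2)) =
      (b - i, b) :: (PySem.List.enumerate bs (i + 1)).map (fun p => (p.2 - p.1, p.2)) := by
  simp [PySem.List.enumerate_cons]

-- shape of the first group
theorem pvGroupRuns_shape (bs : List Int) (i b : Int) :
    ∃ g gs, pvGroupRuns ((PySem.List.enumerate (b :: bs) i).map (fun p => (p.2 - p.1, p.2))) =
      ((b - i, b) :: g) :: gs := by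
  induction bs generalizing i b with
  | nil =>
    refine ⟨[], [], ?_⟩
    simp [PySem.List.enumerate_nil, pvGroupRuns]
  | cons b' bs ih =>
    obtain ⟨g, gs, hg⟩ := ih (i + 1) b'
    rw [pvKeyed_cons, pvGroupRuns_cons, hg]
    by_cases hk : b - i = b' - (i + 1)
    · exact ⟨(b' - (i + 1), b') :: g, gs, by simp [hk]⟩
    · exact ⟨[], ((b' - (i + 1), b') :: g) :: gs, by simp [hk]⟩

-- main bridge: B's grouped output equals pvRuns
theorem pvGroup_main (bs : List Int) (i b : Int) :
    (pvGroupRuns ((PySem.List.enumerate (b :: bs) i).map (fun p => (p.2 - p.1, p.2)))).map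
        (fun g => ((g.getLastD (0, 0)).2, (g.headD (0, 0)).2)) = pvRuns b b bs := by
  induction bs generalizing i b with
  | nil =>
    simp [PySem.List.enumerate_cons, PySem.List.enumerate_nil, pvGroupRuns, pvRuns]
  | cons b' bs ih =>
    obtain ⟨g, gs, hg⟩ := pvGroupRuns_shape bs (i + 1) b'
    have ihmap := ih (i + 1) b'
    rw [hg] at ihmap
    rw [pvKeyed_cons, pvGroupRuns_cons, hg]
    simp only [pvRuns]
    by_cases hk : b - i = b' - (i + 1)
    · have hb' : b' = b + 1 := by omega
      simp only [if_pos hk, if_pos hb']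
      rw [pvRuns_setLo b b', ← ihmap]
      simp [pvSetLo]
    · have hb' : ¬ b' = b + 1 := by omega
      simp only [if_neg hk, if_neg hb']
      rw [← ihmap]
      simp

-- ===== VERDICT (by name: the statement is the Claim_ definition above) =====
theorem bits_to_ranges_py_spec : Claim_equal_bits_to_ranges_py := by
  intro bits _
  unfold Spec_bits_to_ranges_py bits_to_ranges_py bits_to_ranges_py_alt
  cases bits with
  | nil => simp [PySem.List.enumerate_nil, pvGroupRuns]
  | cons b0 rest =>
    rw [pvGroup_main rest 0 b0]
    simpa using pvFoldA rest [] b0 b0
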